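-- pv_equiv track=rewrite | github.com/andrea-rizzini/EncodingDemos | simhash_demos/simhash_complete_chunked.py | stream_token_ngrams
-- ===== SOURCE A (Python) =====
-- from collections import deque
--
-- def stream_token_ngrams(tokens, n=3):
--     if n <= 1:
--         yield from tokens
--         return
--     window = deque(maxlen=n-1)
--     for t in tokens:
--         if len(window) == n - 1:
--             yield " ".join([*window, t])
--         window.append(t)
-- ===== SOURCE B (Python) =====
-- def stream_token_ngrams(tokens, n=3):
--     toks = list(tokens)
--     if n <= 1:
--         yield from toks
--         return
--     for i in range(len(toks) - n + 1):
--         yield " ".join(toks[i:i+n])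
-- ===== Notes on version B (the rewrite author's own statement) =====
-- stated objective: idiomatic
-- what changed: B materializes the tokens once and yields ' '.join(toks[i:i+n]) by index over range(len-n+1), replacing A's bounded-deque sliding window and its fullness check.
import Mathlib
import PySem

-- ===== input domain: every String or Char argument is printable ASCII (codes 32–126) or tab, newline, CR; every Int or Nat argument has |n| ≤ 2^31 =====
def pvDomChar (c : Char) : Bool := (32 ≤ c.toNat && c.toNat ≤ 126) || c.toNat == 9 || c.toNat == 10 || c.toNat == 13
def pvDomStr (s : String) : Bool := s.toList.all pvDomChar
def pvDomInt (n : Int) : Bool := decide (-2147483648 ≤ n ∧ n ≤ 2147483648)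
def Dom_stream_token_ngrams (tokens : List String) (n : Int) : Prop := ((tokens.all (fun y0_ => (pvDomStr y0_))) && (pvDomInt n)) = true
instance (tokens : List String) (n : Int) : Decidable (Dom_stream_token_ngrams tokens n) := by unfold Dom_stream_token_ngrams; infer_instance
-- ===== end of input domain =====

-- B replaces A's bounded-deque sliding window by an index loop yielding " ".join(toks[i:i+n])
-- over range(len-n+1); B materializes the token iterator eagerly (observable only for
-- consumable/infinite iterators, which the List model does not have). Equivalence is about
-- the sequence of yielded values.

-- ===== PORT A =====
-- one step of A's loop body: possible yield while the deque(maxlen=n-1) is full, then append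
def A_step (n : Int) (st : List String × List String) (t : String) : List String × List String :=
  let out := if (st.2.length : Int) = n - 1 then st.1 ++ [PySem.Str.join " " (st.2 ++ [t])] else st.1
  let w' := st.2 ++ [t]
  let window := if (w'.length : Int) > n - 1 then w'.drop 1 else w'
  (out, window)

def stream_token_ngrams (tokens : List String) (n : Int) : List String :=
  if n ≤ 1 then tokens
  else (tokens.foldl (A_step n) ([], [])).1

-- ===== PORT B =====
def stream_token_ngrams_alt (tokens : List String) (n : Int) : List String :=
  if n ≤ 1 then tokens
  else (PySem.List.pyRange 0 ((tokens.length : Int) - n + 1) 1).map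
    (fun i => PySem.Str.join " " (PySem.List.slice tokens (some i) (some (i + n))))

-- ===== PRECONDITION & SPEC =====
def Spec_stream_token_ngrams (tokens : List String) (n : Int) (out : List String) : Prop := out = stream_token_ngrams_alt tokens n
instance (tokens : List String) (n : Int) (out : List String) : Decidable (Spec_stream_token_ngrams tokens n out) := by unfold Spec_stream_token_ngrams; infer_instance

-- ===== CLAIM (what is proved, stated in full; the proofs are below) =====
def Claim_equal_stream_token_ngrams : Prop := ∀ (tokens : List String) (n : Int), Dom_stream_token_ngrams tokens n → Spec_stream_token_ngrams tokens n (stream_token_ngrams tokens n)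

-- ===== LEMMAS AND PROOFS =====

-- invariant of A's loop: starting from a window w (|w| ≤ k, k = n-1), the yields are the
-- joins of the (k+1)-wide windows of w ++ ts
lemma A_loop (k : Nat) (hk : 1 ≤ k) :
    ∀ (ts w out : List String), w.length ≤ k →
      (ts.foldl (A_step ((k : Int) + 1)) (out, w)).1
        = out ++ (List.range (w.length + ts.length - k)).map
            (fun j => PySem.Str.join " " (((w ++ ts).drop j).take (k + 1))) := by
  intro ts
  induction ts with
  | nil =>
    intro w out hw
    simp [Nat.sub_eq_zero_of_le hw]
  | cons t ts ih =>
    intro w out hw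
    by_cases hfull : w.length = k
    · have hw1 : (1 : Nat) ≤ w.length := by omega
      have c1 : ((w.length : Int) = (k : Int) + 1 - 1) := by rw [hfull]; ring
      have c2 : (((w ++ [t]).length : Int) > (k : Int) + 1 - 1) := by simp [hfull]
      have hstep : A_step ((k : Int) + 1) (out, w) t
          = (out ++ [PySem.Str.join " " (w ++ [t])], (w ++ [t]).drop 1) := by
        simp only [A_step]
        rw [if_pos c1, if_pos c2]
      rw [List.foldl_cons, hstep,
        ih ((w ++ [t]).drop 1) (out ++ [PySem.Str.join " " (w ++ [t])])
          (by simp; omega)]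
      have e1 : (w ++ [t]).drop 1 = w.drop 1 ++ [t] :=
        List.drop_append_of_le_length hw1
      have hlen1 : ((w ++ [t]).drop 1).length + ts.length - k = ts.length := by
        simp; omega
      have hlen2 : w.length + (t :: ts).length - k = ts.length + 1 := by
        simp only [List.length_cons, hfull]; omega
      rw [hlen1, hlen2, List.range_succ_eq_map, List.map_cons, List.map_map]
      have h0 : (w ++ t :: ts).take (k + 1) = w ++ [t] := by
        have h' : w ++ t :: ts = (w ++ [t]) ++ ts := by simp
        rw [h', List.take_append_of_le_length (by simp [hfull]),
          List.take_of_length_le (by simp [hfull])]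
      have hdrop : ∀ j : Nat, ((w ++ [t]).drop 1 ++ ts).drop j = (w ++ t :: ts).drop (j + 1) := by
        intro j
        have e2 : (w ++ [t]).drop 1 ++ ts = (w ++ t :: ts).drop 1 := by
          rw [List.drop_append_of_le_length hw1, List.drop_append_of_le_length hw1]
          simp
        rw [e2, List.drop_drop, Nat.add_comm]
      simp only [hdrop]
      simp [h0, Function.comp, Nat.succ_eq_add_one, List.append_assoc]
    · have hlt : w.length < k := lt_of_le_of_ne hw hfull
      have hstep : A_step ((k : Int) + 1) (out, w) t = (out, w ++ [t]) := by
        have h1 : ¬ ((w.length : Int) = (k : Int) + 1 - 1) := by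
          intro h; exact hfull (by omega)
        have h2 : ¬ (((w ++ [t]).length : Int) > (k : Int) + 1 - 1) := by
          simp; omega
        simp only [A_step]
        rw [if_neg h1, if_neg h2]
      rw [List.foldl_cons, hstep, ih (w ++ [t]) out (by simp; omega)]
      have : (w ++ [t]).length + ts.length - k = w.length + (t :: ts).length - k := by
        simp; omega
      rw [this]
      simp [List.append_assoc]

theorem stream_token_ngrams_spec : Claim_equal_stream_token_ngrams := by
  intro tokens n _
  unfold Spec_stream_token_ngrams stream_token_ngrams stream_token_ngrams_alt
  by_cases h : n ≤ 1
  · simp [h]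
  · rw [if_neg h, if_neg h]
    have hn : n = ((n - 1).toNat : Int) + 1 := by omega
    set k := (n - 1).toNat with hkdef
    have hk1 : 1 ≤ k := by omega
    rw [hn, A_loop k hk1 tokens [] [] (by simp)]
    rw [PySem.List.pyRange_one]
    have hcnt : ((tokens.length : Int) - ((k : Int) + 1) + 1 - 0).toNat = tokens.length - k := by
      omega
    rw [hcnt, List.map_map]
    simp only [List.nil_append, List.length_nil, Nat.zero_add]
    apply List.map_congr_left
    intro j hj
    have hz : (0 : Int) + (j : Int) = (j : Int) := by ring
    have hsl : PySem.List.slice tokens (some (j : Int)) (some ((j : Int) + ((k : Int) + 1)))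
        = (tokens.drop j).take (k + 1) := by
      rw [PySem.List.slice_toNat tokens (by omega) (by omega)]
      congr 1
      omega
    simp only [Function.comp, hz, hsl]
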